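-- pv_equiv track=rewrite | github.com/FJoyFly/pouncation | bi_new1/test.py | dele_none
-- ===== SOURCE A (Python) =====
-- def dele_none(label):
--     for i in range(len(label)):
--         if label[len(label) - 1] is None:
--             label.pop()
--         else:
--             break
--     for i in range(len(label)):
--         if label[i] is None:
--             label[i] = 2
--     return label
-- ===== SOURCE B (Python) =====
-- def dele_none(label):
--     # Single backward pass: pop trailing Nones until the first non-None,
--     # then rewrite earlier Nones to 2. Mutates label in place like A.
--     trimming = True
--     for i in range(len(label) - 1, -1, -1):
--         if label[i] is None:
--             if trimming:
--                 label.pop()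
--             else:
--                 label[i] = 2
--         else:
--             trimming = False
--     return label
-- ===== Notes on version B (the rewrite author's own statement) =====
-- stated objective: alternative
-- what changed: Replaces A's two forward passes (a pop-loop on the last element, then a full rewrite pass) by one stateful backward scan that decides pop vs rewrite per element.
import Mathlib
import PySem

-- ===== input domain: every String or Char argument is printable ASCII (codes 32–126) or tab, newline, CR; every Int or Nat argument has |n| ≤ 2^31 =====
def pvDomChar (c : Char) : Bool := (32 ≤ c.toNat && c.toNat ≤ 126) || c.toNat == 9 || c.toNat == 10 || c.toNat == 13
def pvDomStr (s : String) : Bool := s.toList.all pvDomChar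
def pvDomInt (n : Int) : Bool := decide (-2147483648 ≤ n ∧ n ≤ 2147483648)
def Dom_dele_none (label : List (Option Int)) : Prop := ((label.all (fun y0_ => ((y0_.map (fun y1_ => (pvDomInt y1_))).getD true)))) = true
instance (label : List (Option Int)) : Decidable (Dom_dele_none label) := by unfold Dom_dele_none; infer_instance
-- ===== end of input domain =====

-- B replaces A's two forward passes by one stateful backward scan (objective: alternative
-- decomposition, same cost). Both Pythons mutate `label` in place identically; the theorems
-- below are about the returned value.

-- ===== PORT A =====
-- first loop of A: up to `fuel = len(label)` iterations; each looks at label[len(label)-1],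
-- pops it if None, else breaks (returns the current list).
def goA : Nat → List (Option Int) → List (Option Int)
  | 0, l => l
  | Nat.succ k, l =>
    match PySem.List.pyGet? l ((l.length : Int) - 1) with
    | some none => goA k l.dropLast      -- label.pop()
    | _ => l                             -- break (the `none` case is unreachable: Python would raise, but fuel = initial length prevents it)

def dele_none (label : List (Option Int)) : List (Option Int) :=
  let l1 := goA label.length label
  -- second loop of A: label[i] = 2 wherever label[i] is None
  l1.map (fun x => if x = none then some 2 else x)

-- ===== PORT B =====
-- B's single loop runs i from len-1 down to 0: structurally, a left-to-right scan of the
-- reversed list carrying the `trimming` flag; popped elements are skipped, kept ones emitted.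
def goB : Bool → List (Option Int) → List (Option Int)
  | _, [] => []
  | trimming, x :: rest =>
    match x with
    | none => if trimming then goB true rest else some 2 :: goB false rest
    | some v => some v :: goB false rest

def dele_none_alt (label : List (Option Int)) : List (Option Int) :=
  (goB true label.reverse).reverse

-- ===== PRECONDITION & SPEC =====
def Spec_dele_none (label : List (Option Int)) (out : List (Option Int)) : Prop := out = dele_none_alt label
instance (label : List (Option Int)) (out : List (Option Int)) : Decidable (Spec_dele_none label out) := by unfold Spec_dele_none; infer_instance

-- ===== CLAIM (what is proved, stated in full; the proofs are below) =====
def Claim_equal_dele_none : Prop := ∀ (label : List (Option Int)), Dom_dele_none label → Spec_dele_none label (dele_none label)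

-- ===== LEMMAS AND PROOFS =====

-- A's trim loop, given enough fuel, drops the maximal trailing run of `none`s.
theorem goA_eq_dropWhile (fuel : Nat) : ∀ (l : List (Option Int)), l.length ≤ fuel →
    goA fuel l = (l.reverse.dropWhile (fun x => x = none)).reverse := by
  induction fuel with
  | zero =>
    intro l h
    have : l = [] := List.eq_nil_of_length_eq_zero (Nat.le_zero.mp h)
    simp [this, goA]
  | succ k ih =>
    intro l h
    match hl : l.reverse with
    | [] =>
      have : l = [] := by simpa using congrArg List.reverse hl
      simp [this, goA, PySem.List.pyGet?]
    | x :: rest =>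
      have hle : l = rest.reverse ++ [x] := by
        have := congrArg List.reverse hl; simpa using this
      have hlast : PySem.List.pyGet? l ((l.length : Int) - 1) = some x := by
        subst hle
        have hlen : ((rest.reverse ++ [x]).length : Int) - 1 = -1 + ((rest.reverse ++ [x]).length : Int) := by ring
        rw [hlen]
        have h1 : (1:Nat) ≤ (rest.reverse ++ [x]).length := by simp
        have := PySem.List.pyGet?_neg_natCast (xs := rest.reverse ++ [x]) (k := 1) (by omega) h1
        simp at this
        simpa [PySem.List.pyGet?_neg_one] using this
      cases x with
      | none =>
        have hdrop : l.dropLast = rest.reverse := by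
          subst hle; simp
        have hrec : goA (k+1) l = goA k l.dropLast := by
          simp [goA, hlast]
        rw [hrec, hdrop, ih _ (by subst hle; simp at h ⊢; omega)]
        simp [List.dropWhile]
      | some v =>
        have : goA (k+1) l = l := by simp [goA, hlast]
        rw [this]
        simp [List.dropWhile, hle]

-- B's scan with trimming = false just rewrites `none`s to 2.
theorem goB_false (r : List (Option Int)) :
    goB false r = r.map (fun x => if x = none then some 2 else x) := by
  induction r with
  | nil => simp [goB]
  | cons x rest ih => cases x <;> simp [goB, ih]

-- B's scan with trimming = true drops the leading `none`s then rewrites.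
theorem goB_true (r : List (Option Int)) :
    goB true r = (r.dropWhile (fun x => x = none)).map (fun x => if x = none then some 2 else x) := by
  induction r with
  | nil => simp [goB]
  | cons x rest ih =>
    cases x with
    | none => simpa [goB, List.dropWhile] using ih
    | some v => simp [goB, List.dropWhile, goB_false]

-- ===== VERDICT (by name: the statement is the Claim_ definition above) =====
theorem dele_none_spec : Claim_equal_dele_none := by
  intro label _
  unfold Spec_dele_none dele_none dele_none_alt
  rw [goA_eq_dropWhile label.length label (le_refl _), goB_true]
  simp [List.map_reverse]
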